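-- pv_equiv track=rewrite | github.com/Zessay/SPDR | resolution/common/metrics/rewrite_em.py | _is_soft_em
-- ===== SOURCE A (Python) =====
-- from typing import List, Dict, Union
--
-- def _is_soft_em(
--                 predictions: Union[List[str], str],
--                 gold_targets: Union[List[str], str]):
--     g_len = len(gold_targets)
--     for i, ch in enumerate(gold_targets):
--         try:
--             cur_index = predictions.index(ch)
--             cur_index += 1
--             # if current word is the last of gold
--             # and so is the prediction
--             if i == g_len and cur_index == len(predictions):
--                 return True
--             predictions = predictions[cur_index:]
--         except Exception:
--             return False
--     return True
-- ===== SOURCE B (Python) =====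
-- def _is_soft_em(predictions, gold_targets):
--     j = 0
--     n = len(gold_targets)
--     for ch in predictions:
--         if j < n and ch == gold_targets[j]:
--             j += 1
--     return j == n
-- ===== Notes on version B (the rewrite author's own statement) =====
-- stated objective: faster
-- what changed: Replaces the per-gold-character .index() rescan plus slicing of predictions with a single two-pointer pass over predictions that advances a cursor into gold_targets.
import Mathlib
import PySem

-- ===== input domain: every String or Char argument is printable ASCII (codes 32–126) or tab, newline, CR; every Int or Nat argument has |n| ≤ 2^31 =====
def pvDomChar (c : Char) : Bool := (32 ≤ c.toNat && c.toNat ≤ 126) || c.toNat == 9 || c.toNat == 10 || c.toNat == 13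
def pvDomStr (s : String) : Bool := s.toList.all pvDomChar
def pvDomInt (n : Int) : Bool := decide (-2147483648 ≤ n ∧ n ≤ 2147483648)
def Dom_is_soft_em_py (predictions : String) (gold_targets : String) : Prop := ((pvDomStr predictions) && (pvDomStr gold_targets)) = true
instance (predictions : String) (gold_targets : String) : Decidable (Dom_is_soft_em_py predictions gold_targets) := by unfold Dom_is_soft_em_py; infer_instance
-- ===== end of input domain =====

-- B replaces A's per-gold-character .index() rescan + slicing with one two-pointer pass (objective: faster).


-- ===== PORT A =====
-- the for-loop over enumerate(gold_targets): state = remaining gold chars, current predictions, i, fixed g_len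
def pvALoop : List Char → List Char → Nat → Nat → Bool
  | _, [], _, _ => true
  | preds, ch :: rest, i, glen =>
    match PySem.List.index? preds ch with      -- predictions.index(ch); none = ValueError, caught → return False
    | none => false
    | some idx =>
      let cur := idx + 1
      if i == glen && cur == preds.length then true
      else pvALoop (PySem.List.slice preds (some (cur : Int)) none) rest (i + 1) glen

def is_soft_em_py (predictions : String) (gold_targets : String) : Bool :=
  pvALoop predictions.toList gold_targets.toList 0 gold_targets.toList.length

-- ===== PORT B =====
-- the single for-loop over predictions, advancing cursor j into gold_targets
def pvBLoop (gold : List Char) : List Char → Nat → Nat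
  | [], j => j
  | ch :: ps, j =>
    pvBLoop gold ps (if decide (j < gold.length) && (gold[j]? == some ch) then j + 1 else j)

def is_soft_em_py_alt (predictions : String) (gold_targets : String) : Bool :=
  pvBLoop gold_targets.toList predictions.toList 0 == gold_targets.toList.length

-- ===== PRECONDITION & SPEC =====
def Spec_is_soft_em_py (predictions : String) (gold_targets : String) (out : Bool) : Prop := out = is_soft_em_py_alt predictions gold_targets
instance (predictions : String) (gold_targets : String) (out : Bool) : Decidable (Spec_is_soft_em_py predictions gold_targets out) := by unfold Spec_is_soft_em_py; infer_instance

-- ===== CLAIM (what is proved, stated in full; the proofs are below) =====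
def Claim_equal_is_soft_em_py : Prop := ∀ (predictions : String) (gold_targets : String), Dom_is_soft_em_py predictions gold_targets → Spec_is_soft_em_py predictions gold_targets (is_soft_em_py predictions gold_targets)

-- ===== LEMMAS AND PROOFS =====

-- common reference: the classic subsequence recursion
def pvSub : List Char → List Char → Bool
  | _, [] => true
  | [], _ :: _ => false
  | p :: ps, g :: gs => if p == g then pvSub ps gs else pvSub ps (g :: gs)

theorem pvSub_of_not_mem (ch : Char) (gs : List Char) :
    ∀ ps : List Char, ch ∉ ps → pvSub ps (ch :: gs) = false := by
  intro ps
  induction ps with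
  | nil => intro _; rfl
  | cons p ps ih =>
    intro h
    simp only [List.mem_cons, not_or] at h
    simp [pvSub, beq_iff_eq, Ne.symm h.1, ih h.2]

theorem pvSub_index (ch : Char) (gs : List Char) :
    ∀ (ps : List Char) (idx : Nat), PySem.List.index? ps ch = some idx →
      pvSub ps (ch :: gs) = pvSub (ps.drop (idx + 1)) gs := by
  intro ps
  induction ps with
  | nil => intro idx h; simp [PySem.List.index?] at h
  | cons p ps ih =>
    intro idx h
    by_cases hp : p = ch
    · subst hp
      rw [PySem.List.index?_cons_self] at h
      cases h
      simp [pvSub]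
    · rw [PySem.List.index?_cons_of_ne ps hp] at h
      cases hk : PySem.List.index? ps ch with
      | none => rw [hk] at h; simp at h
      | some k =>
        rw [hk] at h
        simp only [Option.map_some] at h
        cases h
        have : pvSub (p :: ps) (ch :: gs) = pvSub ps (ch :: gs) := by
          simp [pvSub, beq_iff_eq, hp]
        rw [this, ih k hk]
        rfl

theorem pvALoop_eq_pvSub (glen : Nat) :
    ∀ (gold preds : List Char) (i : Nat), i + gold.length = glen →
      pvALoop preds gold i glen = pvSub preds gold := by
  intro gold
  induction gold with
  | nil => intro preds i _; cases preds <;> rfl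
  | cons ch rest ih =>
    intro preds i hinv
    simp only [pvALoop]
    cases hk : PySem.List.index? preds ch with
    | none =>
      rw [pvSub_of_not_mem ch rest preds
        ((PySem.List.index?_eq_none_iff preds ch).mp hk)]
    | some idx =>
      have hi : (i == glen) = false := by simp at hinv ⊢; omega
      simp only [hi, Bool.false_and, Bool.false_eq_true, if_false]
      rw [PySem.List.slice_from_natCast]
      rw [ih (preds.drop (idx + 1)) (i + 1) (by simp at hinv ⊢; omega)]
      exact (pvSub_index ch rest preds idx hk).symm

theorem pvBLoop_eq_pvSub (gold : List Char) :
    ∀ (preds : List Char) (j : Nat), j ≤ gold.length →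
      ((pvBLoop gold preds j == gold.length) = pvSub preds (gold.drop j)) := by
  intro preds
  induction preds with
  | nil =>
    intro j hj
    rcases Nat.lt_or_ge j gold.length with h | h
    · have : gold.drop j ≠ [] := by
        intro he; have := List.length_drop (l := gold) (i := j); rw [he] at this; simp at this; omega
      cases hd : gold.drop j with
      | nil => exact absurd hd this
      | cons g gs => simp [pvBLoop, pvSub, Nat.ne_of_lt h]
    · have hj' : j = gold.length := le_antisymm hj h
      simp [pvBLoop, pvSub, hj', List.drop_length]
  | cons ch ps ih =>
    intro j hj
    rcases Nat.lt_or_ge j gold.length with h | h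
    · have hd : gold.drop j = gold[j] :: gold.drop (j + 1) := List.drop_eq_getElem_cons h
      have hget : gold[j]? = some gold[j] := List.getElem?_eq_getElem h
      by_cases hc : gold[j] = ch
      · have : pvBLoop gold (ch :: ps) j = pvBLoop gold ps (j + 1) := by
          simp [pvBLoop, h, hc]
        rw [this, ih (j + 1) h, hd]
        simp [pvSub, hc]
      · have : pvBLoop gold (ch :: ps) j = pvBLoop gold ps j := by
          simp [pvBLoop, h, hc]
        rw [this, ih j hj, hd]
        have : pvSub (ch :: ps) (gold[j] :: gold.drop (j + 1)) = pvSub ps (gold[j] :: gold.drop (j + 1)) := by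
          simp [pvSub, beq_iff_eq, Ne.symm hc]
        rw [this, ← hd]
    · have hj' : j = gold.length := le_antisymm hj h
      have : pvBLoop gold (ch :: ps) j = pvBLoop gold ps j := by
        simp [pvBLoop, hj']
      rw [this, ih j hj, hj', List.drop_length]
      cases ps <;> simp [pvSub]

-- ===== VERDICT (by name: the statement is the Claim_ definition above) =====
theorem is_soft_em_py_spec : Claim_equal_is_soft_em_py := by
  intro predictions gold_targets _
  unfold Spec_is_soft_em_py is_soft_em_py is_soft_em_py_alt
  rw [pvALoop_eq_pvSub gold_targets.toList.length gold_targets.toList predictions.toList 0 (by simp)]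
  rw [pvBLoop_eq_pvSub gold_targets.toList predictions.toList 0 (Nat.zero_le _)]
  simp
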